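-- pv_equiv track=rewrite | github.com/wangxiaohui2015/python_basics | basic_04/multi_return.py | cal_num
-- ===== SOURCE A (Python) =====
-- def cal_num(num):
--     if num <= 0:
--         return 0
--     result_sum = 0
--     result_multi = 1
--     for i in range(num):
--         result_sum += (i + 1)
--         result_multi *= (i + 1)
--     return result_sum, result_multi
-- ===== SOURCE B (Python) =====
-- def cal_num(num):
--     if num <= 0:
--         return 0
--     fact = 1
--     i = num
--     while i > 1:
--         fact *= i
--         i -= 1
--     return num * (num + 1) // 2, fact
-- ===== Notes on version B (the rewrite author's own statement) =====
-- stated objective: alternative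
-- what changed: B replaces A's single ascending accumulation loop by the closed-form Gauss sum num*(num+1)//2 plus a separate descending while-loop that multiplies from num downwards.
-- outside the precondition, e.g. on cal_num(0): A returns 0, B returns 0
import Mathlib
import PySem

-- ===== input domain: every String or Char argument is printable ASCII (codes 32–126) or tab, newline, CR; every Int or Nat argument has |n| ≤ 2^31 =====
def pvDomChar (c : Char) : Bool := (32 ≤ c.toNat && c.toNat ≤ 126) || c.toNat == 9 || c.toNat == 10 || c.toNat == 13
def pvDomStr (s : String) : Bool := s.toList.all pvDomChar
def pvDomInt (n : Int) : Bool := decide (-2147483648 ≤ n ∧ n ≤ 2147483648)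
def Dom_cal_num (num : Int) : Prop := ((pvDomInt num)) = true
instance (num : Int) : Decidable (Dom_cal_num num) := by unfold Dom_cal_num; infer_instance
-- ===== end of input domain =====

-- B replaces A's ascending accumulation loop by the closed-form Gauss sum and a descending product loop (objective: alternative).

-- ===== PORT A =====
def cal_num (num : Int) : Int × Int :=
  if num ≤ 0 then (0, 0)  -- Python returns the bare int 0 here (not a pair); excluded by Pre_
  else (PySem.List.pyRange 0 num 1).foldl
    (fun st i => (st.1 + (i + 1), st.2 * (i + 1))) (0, 1)

-- ===== PORT B =====
-- the 'while i > 1: fact *= i; i -= 1' loop of Source B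
def calFactLoop (fact : Int) (i : Int) : Int :=
  if 1 < i then calFactLoop (fact * i) (i - 1) else fact
termination_by i.toNat
decreasing_by omega

def cal_num_alt (num : Int) : Int × Int :=
  if num ≤ 0 then (0, 0)  -- Python returns the bare int 0 here (not a pair); excluded by Pre_
  else (PySem.Int.floordiv (num * (num + 1)) 2, calFactLoop 1 num)

-- ===== PRECONDITION & SPEC =====
-- Pre_ excludes num ≤ 0, where the Python returns the bare int 0 — not a value of the pair type Int × Int.
def Pre_cal_num (num : Int) : Prop := 0 < num
instance (num : Int) : Decidable (Pre_cal_num num) := by unfold Pre_cal_num; infer_instance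
def pvWitness_cal_num : Int := 5

def Spec_cal_num (num : Int) (out : Int × Int) : Prop := out = cal_num_alt num
instance (num : Int) (out : Int × Int) : Decidable (Spec_cal_num num out) := by unfold Spec_cal_num; infer_instance

-- ===== CLAIM (what is proved, stated in full; the proofs are below) =====
def Claim_equal_cal_num : Prop := ∀ (num : Int), Dom_cal_num num → Pre_cal_num num → Spec_cal_num num (cal_num num)

-- ===== LEMMAS AND PROOFS =====

-- A's loop over range(n) computes the pair (1+…+n, n!).
lemma calA_loop (n : Nat) :
    (PySem.List.pyRange 0 (n : Int) 1).foldl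
      (fun st i => (st.1 + (i + 1), st.2 * (i + 1))) (0, 1)
    = (((n * (n + 1) / 2 : Nat) : Int), ((Nat.factorial n : Nat) : Int)) := by
  induction n with
  | zero => simp [PySem.List.pyRange_one_eq_nil]
  | succ m ih =>
    rw [show ((m + 1 : Nat) : Int) = (m : Int) + 1 by push_cast; ring,
        PySem.List.pyRange_one_succ_right (by positivity), List.foldl_append, ih]
    simp only [List.foldl_cons, List.foldl_nil, Prod.mk.injEq]
    have hs : (m + 1) * (m + 1 + 1) / 2 = m * (m + 1) / 2 + (m + 1) := by
      have h2 : 2 ∣ m * (m + 1) := (Nat.even_mul_succ_self m).two_dvd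
      have h3 : 2 ∣ (m + 1) * (m + 1 + 1) := (Nat.even_mul_succ_self (m + 1)).two_dvd
      have h4 : (m + 1) * (m + 1 + 1) = m * (m + 1) + 2 * (m + 1) := by ring
      omega
    rw [hs, Nat.factorial_succ]
    constructor <;> (push_cast; ring)

-- B's descending while-loop computes fact * i!.
lemma calFactLoop_eq (fact : Int) (i : Int) (h : 0 ≤ i) :
    calFactLoop fact i = fact * ((Nat.factorial i.toNat : Nat) : Int) := by
  generalize hN : i.toNat = N
  induction N generalizing fact i with
  | zero =>
    rw [calFactLoop, if_neg (by omega)]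
    simp [Nat.factorial]
  | succ k ih =>
    rw [calFactLoop]
    by_cases h1 : 1 < i
    · rw [if_pos h1, ih (fact * i) (i - 1) (by omega) (by omega), Nat.factorial_succ]
      have hi : i = (k : Int) + 1 := by omega
      rw [hi]; push_cast; ring
    · rw [if_neg h1, show (k : Nat) + 1 = 1 by omega, Nat.factorial_one]
      simp

-- the Gauss closed form under Python floor division
lemma gauss_floordiv (n : Nat) :
    PySem.Int.floordiv ((n : Int) * ((n : Int) + 1)) 2 = ((n * (n + 1) / 2 : Nat) : Int) := by
  rw [show (n : Int) * ((n : Int) + 1) = ((n * (n + 1) : Nat) : Int) by push_cast; ring]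
  exact_mod_cast PySem.Int.floordiv_natCast (n * (n + 1)) 2

-- ===== VERDICT (by name: the statement is the Claim_ definition above) =====
theorem cal_num_spec : Claim_equal_cal_num := by
  intro num _ hpre
  unfold Spec_cal_num cal_num cal_num_alt
  have hn : ¬ num ≤ 0 := by exact not_le.mpr hpre
  rw [if_neg hn, if_neg hn]
  have hnum : num = ((num.toNat : Nat) : Int) := by omega
  rw [hnum, calA_loop, gauss_floordiv, calFactLoop_eq 1 _ (by omega), Int.toNat_natCast]
  simp
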